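-- pv_equiv track=rewrite | github.com/ole-htw/transceiver-ui | transceiver/helpers/rx_to_file.py | ensure_uhd_frame_sizes
-- ===== SOURCE A (Python) =====
-- def ensure_uhd_frame_sizes(args_str, recv_frame_size=8000, send_frame_size=8000, num_recv_frames=256, num_send_frames=256):
--     """Ensure recv/send frame sizes and frame counts are present in UHD device args."""
--     components = [part for part in args_str.split(",") if part]
--
--     def _has(prefix):
--         return any(part.startswith(prefix) for part in components)
--
--     if not _has("recv_frame_size="):
--         components.append(f"recv_frame_size={recv_frame_size}")
--     if not _has("send_frame_size="):
--         components.append(f"send_frame_size={send_frame_size}")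
--     if not _has("num_recv_frames="):
--         components.append(f"num_recv_frames={num_recv_frames}")
--     if not _has("num_send_frames="):
--         components.append(f"num_send_frames={num_send_frames}")
--
--     return ",".join(components)
-- ===== SOURCE B (Python) =====
-- def ensure_uhd_frame_sizes(args_str, recv_frame_size=8000, send_frame_size=8000, num_recv_frames=256, num_send_frames=256):
--     """Ensure recv/send frame sizes and frame counts are present in UHD device args."""
--     missing = {"recv_frame_size": recv_frame_size,
--                "send_frame_size": send_frame_size,
--                "num_recv_frames": num_recv_frames,
--                "num_send_frames": num_send_frames}
--     pieces = []
--     for part in args_str.split(","):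
--         if part:
--             pieces.append(part)
--             head, sep, _ = part.partition("=")
--             if sep:
--                 missing.pop(head, None)
--     for key, value in missing.items():
--         pieces.append(f"{key}={value}")
--     return ",".join(pieces)
-- ===== Notes on version B (the rewrite author's own statement) =====
-- stated objective: alternative
-- what changed: B fuses everything into one pass over the split parts that simultaneously collects the non-empty pieces and deletes each seen key (text before the first '=') from a dict of pending defaults, then appends whatever defaults remain, instead of A's filter pass plus four separate startswith scans over the growing component list.
import Mathlib
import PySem

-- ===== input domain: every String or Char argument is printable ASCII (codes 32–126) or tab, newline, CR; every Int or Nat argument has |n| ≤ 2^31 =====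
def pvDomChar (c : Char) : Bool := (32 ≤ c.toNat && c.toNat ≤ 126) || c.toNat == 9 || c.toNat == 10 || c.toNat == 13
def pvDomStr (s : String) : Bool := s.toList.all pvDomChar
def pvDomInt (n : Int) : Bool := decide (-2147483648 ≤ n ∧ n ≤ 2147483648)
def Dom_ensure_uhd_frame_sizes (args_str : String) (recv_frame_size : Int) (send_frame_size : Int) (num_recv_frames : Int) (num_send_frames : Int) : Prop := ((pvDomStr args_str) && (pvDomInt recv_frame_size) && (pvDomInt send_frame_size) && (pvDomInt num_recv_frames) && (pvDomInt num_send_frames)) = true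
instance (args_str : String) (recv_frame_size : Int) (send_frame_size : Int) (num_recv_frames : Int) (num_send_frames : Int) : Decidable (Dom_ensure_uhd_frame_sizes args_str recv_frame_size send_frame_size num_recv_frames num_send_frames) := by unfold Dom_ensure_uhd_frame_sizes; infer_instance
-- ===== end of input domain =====

-- B replaces A's filter pass plus four startswith scans by ONE fused pass that collects the non-empty
-- pieces while deleting each seen key from a dict of pending defaults, then appends what remains (alternative).

-- ===== PORT A =====
-- components = [part for part in args_str.split(",") if part]
-- _has(prefix) = any(part.startswith(prefix) for part in components)
def ensure_uhd_frame_sizes (args_str : String) (recv_frame_size : Int) (send_frame_size : Int) (num_recv_frames : Int) (num_send_frames : Int) : String :=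
  let components := ((PySem.Str.split? args_str ",").getD []).filter (fun part => part != "")
  let has := fun (comps : List String) (pfx : String) => comps.any (fun part => PySem.Str.startswith part pfx)
  let components := if has components "recv_frame_size=" then components
    else components ++ [PySem.Str.join "" ["recv_frame_size=", PySem.Int.toStr recv_frame_size]]
  let components := if has components "send_frame_size=" then components
    else components ++ [PySem.Str.join "" ["send_frame_size=", PySem.Int.toStr send_frame_size]]
  let components := if has components "num_recv_frames=" then components
    else components ++ [PySem.Str.join "" ["num_recv_frames=", PySem.Int.toStr num_recv_frames]]
  let components := if has components "num_send_frames=" then components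
    else components ++ [PySem.Str.join "" ["num_send_frames=", PySem.Int.toStr num_send_frames]]
  PySem.Str.join "," components

-- ===== PORT B =====
-- missing = {key: default, …}; ONE loop over args_str.split(",") keeping non-empty parts and popping
-- each seen key from missing; then append every (key, value) still in missing, in insertion order.
def ensure_uhd_frame_sizes_alt (args_str : String) (recv_frame_size : Int) (send_frame_size : Int) (num_recv_frames : Int) (num_send_frames : Int) : String :=
  let missing : PySem.Dict String Int := PySem.Dict.ofList
    [("recv_frame_size", recv_frame_size), ("send_frame_size", send_frame_size),
     ("num_recv_frames", num_recv_frames), ("num_send_frames", num_send_frames)]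
  let st := ((PySem.Str.split? args_str ",").getD []).foldl
    (fun (st : List String × PySem.Dict String Int) part =>
      if part != "" then
        let pieces := st.1 ++ [part]
        -- head, sep, _ = part.partition("=") ; if sep: missing.pop(head, None)
        -- (exact port of this use of str.partition: head is the text before the first '=',
        --  and sep is non-empty exactly when '=' occurs in part)
        let head := String.ofList (part.toList.takeWhile (· ≠ '='))
        if PySem.Str.isIn "=" part then (pieces, st.2.erase head) else (pieces, st.2)
      else st)
    ([], missing)
  PySem.Str.join "," (st.1 ++ st.2.items.map (fun kv => PySem.Str.join "" [kv.1, "=", PySem.Int.toStr kv.2]))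

-- ===== PRECONDITION & SPEC =====
def Spec_ensure_uhd_frame_sizes (args_str : String) (recv_frame_size : Int) (send_frame_size : Int) (num_recv_frames : Int) (num_send_frames : Int) (out : String) : Prop := out = ensure_uhd_frame_sizes_alt args_str recv_frame_size send_frame_size num_recv_frames num_send_frames
instance (args_str : String) (recv_frame_size : Int) (send_frame_size : Int) (num_recv_frames : Int) (num_send_frames : Int) (out : String) : Decidable (Spec_ensure_uhd_frame_sizes args_str recv_frame_size send_frame_size num_recv_frames num_send_frames out) := by unfold Spec_ensure_uhd_frame_sizes; infer_instance

-- ===== CLAIM (what is proved, stated in full; the proofs are below) =====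
def Claim_equal_ensure_uhd_frame_sizes : Prop := ∀ (args_str : String) (recv_frame_size : Int) (send_frame_size : Int) (num_recv_frames : Int) (num_send_frames : Int), Dom_ensure_uhd_frame_sizes args_str recv_frame_size send_frame_size num_recv_frames num_send_frames → Spec_ensure_uhd_frame_sizes args_str recv_frame_size send_frame_size num_recv_frames num_send_frames (ensure_uhd_frame_sizes args_str recv_frame_size send_frame_size num_recv_frames num_send_frames)

-- ===== LEMMAS AND PROOFS =====

-- does `part` count as an occurrence of key k in B's loop? (non-empty, contains '=', text before the first '=' is k)
def pvMatch (part k : String) : Bool :=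
  (part != "") && PySem.Str.isIn "=" part && (String.ofList (part.toList.takeWhile (· ≠ '=')) == k)

-- B's fused loop, characterised: it returns the filtered parts and the initial dict with every matched key erased
lemma pv_fold (P : List String) : ∀ (acc : List String) (d : PySem.Dict String Int),
    P.foldl
      (fun (st : List String × PySem.Dict String Int) part =>
        if part != "" then
          let pieces := st.1 ++ [part]
          let head := String.ofList (part.toList.takeWhile (· ≠ '='))
          if PySem.Str.isIn "=" part then (pieces, st.2.erase head) else (pieces, st.2)
        else st)
      (acc, d)
    = (acc ++ P.filter (fun part => part != ""),
       ⟨d.items.filter (fun kv => !(P.any (fun part => pvMatch part kv.1)))⟩) := by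
  induction P with
  | nil => intro acc d; cases d; simp
  | cons part rest ih =>
    intro acc d
    by_cases hne : (part != "") = true
    · by_cases heq : PySem.Str.isIn "=" part = true
      · simp only [List.foldl_cons, hne, heq, if_true]
        rw [ih]
        simp only [PySem.Dict.erase, List.filter_filter]
        simp only [Prod.mk.injEq]; refine ⟨?_, ?_⟩
        · simp [hne]
        · congr 1
          apply List.filter_congr
          intro kv _
          have hm : pvMatch part kv.1
              = (String.ofList (part.toList.takeWhile (· ≠ '=')) == kv.1) := by
            simp only [pvMatch, hne, heq, Bool.true_and]
          simp only [List.any_cons, hm, Bool.not_or]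
          rw [Bool.and_comm]
          congr 1
          simp [eq_comm]
      · simp only [List.foldl_cons, hne, if_true, heq, Bool.false_eq_true, if_false]
        rw [ih]
        simp only [Prod.mk.injEq]; refine ⟨?_, ?_⟩
        · simp [hne]
        · congr 1
          apply List.filter_congr
          intro kv _
          have hm : pvMatch part kv.1 = false := by
            simp only [Bool.not_eq_true] at heq
            simp only [pvMatch, heq, Bool.and_false, Bool.false_and]
          simp [List.any_cons, hm]
    · simp only [List.foldl_cons, hne, Bool.false_eq_true, if_false]
      rw [ih]
      simp only [Prod.mk.injEq]; refine ⟨?_, ?_⟩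
      · simp only [Bool.not_eq_true] at hne; simp [hne]
      · congr 1
        apply List.filter_congr
        intro kv _
        simp only [Bool.not_eq_true] at hne
        simp [pvMatch, hne]

-- startswith(key + "=") characterised by membership of '=' and the text before the first '='
lemma pv_prefix_iff (kc : List Char) (h : '=' ∉ kc) (pc : List Char) :
    (kc ++ ['=']) <+: pc ↔ ('=' ∈ pc ∧ pc.takeWhile (· ≠ '=') = kc) := by
  induction kc generalizing pc with
  | nil =>
    cases pc with
    | nil => simp
    | cons c t =>
      by_cases hc : c = '='
      · subst hc; simp [List.takeWhile]
      · have hc' : ¬ '=' = c := fun hh => hc hh.symm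
        simp [List.takeWhile, hc, hc', List.cons_prefix_cons]
  | cons a kc' ih =>
    have ha : a ≠ '=' := fun hh => h (hh ▸ List.mem_cons_self)
    have h' : '=' ∉ kc' := fun hh => h (List.mem_cons_of_mem _ hh)
    cases pc with
    | nil => simp
    | cons c t =>
      by_cases hc : c = '='
      · subst hc
        simp [List.cons_prefix_cons, List.takeWhile, fun hh : a = '=' => ha hh]
      · have hc' : ¬ '=' = c := fun hh => hc hh.symm
        simp [List.cons_prefix_cons, List.takeWhile, hc, hc', ih h' t]
        tauto

lemma pv_takeWhile_app (l r : List Char) (h : '=' ∉ l) : (l ++ '=' :: r).takeWhile (· ≠ '=') = l := by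
  rw [List.takeWhile_append]
  simp [List.takeWhile]
  exact fun _ x hx (he : x = '=') => h (he ▸ hx)

lemma pv_startswith_iff (pfx k : String) (hp : pfx.toList = k.toList ++ ['=']) (h : '=' ∉ k.toList) (s : String) :
    PySem.Str.startswith s pfx = decide ('=' ∈ s.toList ∧ s.toList.takeWhile (· ≠ '=') = k.toList) := by
  rw [PySem.Str.startswith_eq, hp]
  apply Bool.coe_iff_coe.mp
  rw [PySem.Chars.startswith_iff, decide_eq_true_iff]
  exact pv_prefix_iff k.toList h s.toList

-- B's per-part key test, summed over the raw parts, equals A's startswith scan over the filtered parts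
lemma pv_any_match (P : List String) (pfx k : String)
    (hp : pfx.toList = k.toList ++ ['=']) (h : '=' ∉ k.toList) :
    P.any (fun part => pvMatch part k)
      = (P.filter (fun part => part != "")).any (fun part => PySem.Str.startswith part pfx) := by
  rw [List.any_filter]
  congr 1
  funext part
  rw [pv_startswith_iff pfx k hp h part]
  simp only [pvMatch]
  by_cases hne : (part != "") = true
  · simp only [hne, Bool.true_and]
    have hin : PySem.Str.isIn "=" part = decide ('=' ∈ part.toList) := by
      apply Bool.coe_iff_coe.mp
      rw [PySem.Str.isIn_eq, PySem.Chars.isIn_iff_infix, decide_eq_true_iff]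
      simp [List.singleton_infix_iff, show ("=" : String).toList = ['='] from by decide]
    have hkey : (String.ofList (part.toList.takeWhile (· ≠ '=')) == k)
        = decide (part.toList.takeWhile (· ≠ '=') = k.toList) := by
      apply Bool.coe_iff_coe.mp
      simp only [beq_iff_eq, decide_eq_true_iff]
      constructor
      · intro he; rw [← he]; simp
      · intro he; rw [he]; exact String.ofList_toList
    rw [hin, hkey]
    simp [Bool.decide_and]
  · simp [hne]
-- a component appended for a different key never matches a later startswith scan
lemma pv_no_match (pfx k : String) (hp : pfx.toList = k.toList ++ ['=']) (h : '=' ∉ k.toList)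
    (k' : String) (h' : '=' ∉ k'.toList) (hne : k'.toList ≠ k.toList) (v : Int) :
    PySem.Str.startswith (PySem.Str.join "" [k', "=", PySem.Int.toStr v]) pfx = false := by
  rw [pv_startswith_iff pfx k hp h]
  have htl : (PySem.Str.join "" [k', "=", PySem.Int.toStr v]).toList
      = k'.toList ++ '=' :: (PySem.Int.toStr v).toList := by
    simp [PySem.Str.toList_join, PySem.Chars.join, List.intercalate]
  rw [htl, pv_takeWhile_app _ _ h']
  simp [hne]

-- the two ways of writing f"{key}={value}" agree
lemma pv_join_eq (pfx k : String) (hp : pfx.toList = k.toList ++ ['=']) (v : Int) :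
    PySem.Str.join "" [pfx, PySem.Int.toStr v] = PySem.Str.join "" [k, "=", PySem.Int.toStr v] := by
  apply String.toList_inj.mp
  simp [PySem.Str.toList_join, PySem.Chars.join, List.intercalate, hp]

-- ===== VERDICT (by name: the statement is the Claim_ definition above) =====
theorem ensure_uhd_frame_sizes_spec : Claim_equal_ensure_uhd_frame_sizes := by
  unfold Claim_equal_ensure_uhd_frame_sizes
  intro args_str r s nr ns _
  unfold Spec_ensure_uhd_frame_sizes
  simp only [ensure_uhd_frame_sizes, ensure_uhd_frame_sizes_alt]
  rw [pv_fold]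
  set P := (PySem.Str.split? args_str ",").getD [] with hP
  set C := P.filter (fun part => part != "") with hC
  have hitems : (PySem.Dict.ofList
      [("recv_frame_size", r), ("send_frame_size", s),
       ("num_recv_frames", nr), ("num_send_frames", ns)] : PySem.Dict String Int).items
      = [("recv_frame_size", r), ("send_frame_size", s), ("num_recv_frames", nr), ("num_send_frames", ns)] := by
    simp [PySem.Dict.ofList, PySem.Dict.update, PySem.Dict.insert, PySem.Dict.contains, PySem.Dict.empty]
  rw [hitems]
  have hR : ("recv_frame_size=" : String).toList = ("recv_frame_size" : String).toList ++ ['='] := by decide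
  have hS : ("send_frame_size=" : String).toList = ("send_frame_size" : String).toList ++ ['='] := by decide
  have hNR : ("num_recv_frames=" : String).toList = ("num_recv_frames" : String).toList ++ ['='] := by decide
  have hNS : ("num_send_frames=" : String).toList = ("num_send_frames" : String).toList ++ ['='] := by decide
  have eR : '=' ∉ ("recv_frame_size" : String).toList := by decide
  have eS : '=' ∉ ("send_frame_size" : String).toList := by decide
  have eNR : '=' ∉ ("num_recv_frames" : String).toList := by decide
  have eNS : '=' ∉ ("num_send_frames" : String).toList := by decide
  have a1 := pv_any_match P _ _ hR eR
  have a2 := pv_any_match P _ _ hS eS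
  have a3 := pv_any_match P _ _ hNR eNR
  have a4 := pv_any_match P _ _ hNS eNS
  rw [← hC] at a1 a2 a3 a4
  rw [pv_join_eq _ _ hR r, pv_join_eq _ _ hS s, pv_join_eq _ _ hNR nr, pv_join_eq _ _ hNS ns]
  by_cases h1 : C.any (fun part => PySem.Str.startswith part "recv_frame_size=") = true <;>
    by_cases h2 : C.any (fun part => PySem.Str.startswith part "send_frame_size=") = true <;>
      by_cases h3 : C.any (fun part => PySem.Str.startswith part "num_recv_frames=") = true <;>
        by_cases h4 : C.any (fun part => PySem.Str.startswith part "num_send_frames=") = true <;>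
  (try simp only [Bool.not_eq_true] at h1 h2 h3 h4) <;>
  simp only [List.filter_cons, List.filter_nil, a1, a2, a3, a4, h1, h2, h3, h4,
    Bool.not_true, Bool.not_false, List.any_append, List.any_cons, List.any_nil,
    pv_no_match _ _ hS eS "recv_frame_size" eR (by decide) r,
    pv_no_match _ _ hNR eNR "recv_frame_size" eR (by decide) r,
    pv_no_match _ _ hNS eNS "recv_frame_size" eR (by decide) r,
    pv_no_match _ _ hNR eNR "send_frame_size" eS (by decide) s,
    pv_no_match _ _ hNS eNS "send_frame_size" eS (by decide) s,
    pv_no_match _ _ hNS eNS "num_recv_frames" eNR (by decide) nr,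
    Bool.or_false, Bool.false_eq_true, if_true, if_false, List.map_cons, List.map_nil,
    List.nil_append, List.append_nil, List.append_assoc, List.cons_append]
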